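-- pv_equiv track=rewrite | github.com/yshr-926/NeurIPS_LLM_Kyutech-Jakee | finetune/lora_swa_r8a16.py | get_max_seq_length
-- ===== SOURCE A (Python) =====
-- from typing import Dict, List, Literal, Optional, Tuple
--
-- override_max_seq_length = 2048
--
-- def get_max_seq_length(data: List[Dict]) -> Tuple[int, int, int]:
--     # find out the minimum max_seq_length required during fine-tuning (saves memory!)
--     lengths = [len(d["input_ids"]) for d in data]
--     max_seq_length = max(lengths)
--     longest_seq_ix = lengths.index(max_seq_length)
--     # support easy override at the top of the file
--     return (
--         override_max_seq_length if isinstance(override_max_seq_length, int) else max_seq_length,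
--         max_seq_length,
--         longest_seq_ix,
--     )
-- ===== SOURCE B (Python) =====
-- override_max_seq_length = 2048
--
-- def get_max_seq_length(data):
--     # single fused pass: running max and its first index
--     if not data:
--         raise ValueError("max() arg is an empty sequence")
--     best_len = len(data[0]["input_ids"])
--     best_ix = 0
--     for ix in range(1, len(data)):
--         l = len(data[ix]["input_ids"])
--         if l > best_len:
--             best_len, best_ix = l, ix
--     return (override_max_seq_length, best_len, best_ix)
-- ===== Notes on version B (the rewrite author's own statement) =====
-- stated objective: simpler
-- what changed: Fuses A's three linear passes (build lengths list, max(), list.index()) into one loop maintaining the running maximum and its first index; no intermediate list is built.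
-- outside the precondition, e.g. on get_max_seq_length([]): A raises ValueError, B raises ValueError
import Mathlib
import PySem

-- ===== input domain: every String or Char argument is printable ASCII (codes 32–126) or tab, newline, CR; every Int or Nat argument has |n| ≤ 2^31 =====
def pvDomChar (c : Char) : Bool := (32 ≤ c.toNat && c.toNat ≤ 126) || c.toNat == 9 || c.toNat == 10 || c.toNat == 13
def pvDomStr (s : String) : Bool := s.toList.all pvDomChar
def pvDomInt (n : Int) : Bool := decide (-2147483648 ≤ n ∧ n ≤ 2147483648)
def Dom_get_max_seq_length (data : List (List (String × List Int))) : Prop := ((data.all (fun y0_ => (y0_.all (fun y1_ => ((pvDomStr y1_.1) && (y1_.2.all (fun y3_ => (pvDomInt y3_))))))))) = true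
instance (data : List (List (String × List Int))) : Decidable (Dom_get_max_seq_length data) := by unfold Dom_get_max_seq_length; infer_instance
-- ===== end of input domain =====

-- B fuses A's three linear passes (build lengths, max, index) into one loop keeping the
-- running maximum and its first index (objective: simpler, single pass, no intermediate list).
-- Pre_ excludes empty data (max([]) raises ValueError in A, and B raises too) and dicts
-- lacking the "input_ids" key (A raises KeyError, B too).

-- ===== PORT A =====
-- len(d["input_ids"]); key presence is guaranteed by Pre_, so getD [] is exact there
def pvLenA (d : List (String × List Int)) : Int :=
  (((List.lookup "input_ids" d).getD []).length : Int)

def get_max_seq_length (data : List (List (String × List Int))) : Int × Int × Int :=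
  let lengths : List Int := data.map pvLenA
  -- max(lengths); Pre_ gives lengths ≠ [], so getD 0 is exact there
  let max_seq_length : Int := (PySem.List.max? lengths (fun y => y)).getD 0
  -- lengths.index(max_seq_length); the max is a member, so getD 0 is exact
  let longest_seq_ix : Int := (((PySem.List.index? lengths max_seq_length).getD 0 : Nat) : Int)
  -- override_max_seq_length = 2048 is an int, so the isinstance branch always picks it
  (2048, max_seq_length, longest_seq_ix)

-- ===== PORT B =====
def pvLenB (d : List (String × List Int)) : Int :=
  (((List.lookup "input_ids" d).getD []).length : Int)

-- the fused loop over the remaining elements: running best length, its first index, current index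
def pvBLoop : List (List (String × List Int)) → Int → Int → Int → Int × Int
  | [], bl, bi, _ => (bl, bi)
  | d :: rest, bl, bi, ix =>
      let l := pvLenB d
      if bl < l then pvBLoop rest l ix (ix + 1) else pvBLoop rest bl bi (ix + 1)

def get_max_seq_length_alt (data : List (List (String × List Int))) : Int × Int × Int :=
  match data with
  | [] => (2048, 0, 0)   -- unreachable under Pre_ (B raises ValueError here, like A)
  | d :: rest =>
      let p := pvBLoop rest (pvLenB d) 0 1
      (2048, p.1, p.2)

-- ===== PRECONDITION & SPEC =====
-- Pre_ excludes exactly the inputs where A raises: empty data (ValueError from max([]))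
-- and an element without the "input_ids" key (KeyError).
def Pre_get_max_seq_length (data : List (List (String × List Int))) : Prop :=
  data ≠ [] ∧ (data.all (fun d => (List.lookup "input_ids" d).isSome)) = true
instance (data : List (List (String × List Int))) : Decidable (Pre_get_max_seq_length data) := by
  unfold Pre_get_max_seq_length; infer_instance

def pvWitness_get_max_seq_length : (List (List (String × List Int))) :=
  [[("input_ids", [1, 2, 3])], [("input_ids", [4])]]

def Spec_get_max_seq_length (data : List (List (String × List Int))) (out : Int × Int × Int) : Prop := out = get_max_seq_length_alt data
instance (data : List (List (String × List Int))) (out : Int × Int × Int) : Decidable (Spec_get_max_seq_length data out) := by unfold Spec_get_max_seq_length; infer_instance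

-- ===== CLAIM (what is proved, stated in full; the proofs are below) =====
def Claim_equal_get_max_seq_length : Prop := ∀ (data : List (List (String × List Int))), Dom_get_max_seq_length data → Pre_get_max_seq_length data → Spec_get_max_seq_length data (get_max_seq_length data)

-- ===== LEMMAS AND PROOFS =====

-- Loop invariant: if bl is the maximum of the prefix `pre` already scanned, bi its first
-- index there, and ix = pre.length, then the loop returns the max of pre ++ rest's lengths
-- and the first index of that max in the whole lengths list.
theorem pvBLoop_spec : ∀ (rest : List (List (String × List Int))) (pre : List Int) (bl : Int) (bi : Nat),
    (∀ x ∈ pre, x ≤ bl) → PySem.List.index? pre bl = some bi →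
    pvBLoop rest bl (bi : Int) (pre.length : Int)
      = ((rest.map pvLenB).foldl max bl,
         (((PySem.List.index? (pre ++ rest.map pvLenB) ((rest.map pvLenB).foldl max bl)).getD 0 : Nat) : Int)) := by
  intro rest
  induction rest with
  | nil =>
      intro pre bl bi hmax hidx
      rw [PySem.List.index?_eq_idxOf?] at hidx
      simp [pvBLoop, hidx]
  | cons d rest ih =>
      intro pre bl bi hmax hidx
      have hmem : bl ∈ pre := (PySem.List.index?_isSome_iff _ _).mp (by rw [hidx]; rfl)
      by_cases h : bl < pvLenB d
      · have hnot : pvLenB d ∉ pre := fun hc => absurd (hmax _ hc) (by omega)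
        have hidx' : PySem.List.index? (pre ++ [pvLenB d]) (pvLenB d) = some pre.length :=
          PySem.List.index?_append_singleton_self _ _ hnot
        have hmax' : ∀ x ∈ pre ++ [pvLenB d], x ≤ pvLenB d := by
          intro x hx
          rcases List.mem_append.mp hx with hx | hx
          · exact le_of_lt (lt_of_le_of_lt (hmax _ hx) h)
          · simp at hx; omega
        have := ih (pre ++ [pvLenB d]) (pvLenB d) pre.length hmax' hidx'
        simp only [List.length_append, List.length_cons, List.length_nil, List.append_assoc,
          List.cons_append, List.nil_append] at this
        simp only [pvBLoop, List.map_cons, List.foldl_cons, if_pos h,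
          max_eq_right (le_of_lt h)]
        rw [← this]
        push_cast
        ring_nf
      · have hmax' : ∀ x ∈ pre ++ [pvLenB d], x ≤ bl := by
          intro x hx
          rcases List.mem_append.mp hx with hx | hx
          · exact hmax _ hx
          · simp at hx; omega
        have hidx' : PySem.List.index? (pre ++ [pvLenB d]) bl = some bi := by
          rw [PySem.List.index?_append_of_mem _ hmem, hidx]
        have := ih (pre ++ [pvLenB d]) bl bi hmax' hidx'
        simp only [List.length_append, List.length_cons, List.length_nil, List.append_assoc,
          List.cons_append, List.nil_append] at this
        simp only [pvBLoop, List.map_cons, List.foldl_cons, if_neg h,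
          max_eq_left (by omega : pvLenB d ≤ bl)]
        rw [← this]
        push_cast
        ring_nf

-- ===== VERDICT (by name: the statement is the Claim_ definition above) =====
theorem get_max_seq_length_spec : Claim_equal_get_max_seq_length := by
  intro data _ hpre
  unfold Spec_get_max_seq_length
  obtain ⟨hne, _⟩ := hpre
  match data with
  | [] => exact absurd rfl hne
  | d :: rest =>
      have hloop := pvBLoop_spec rest [pvLenB d] (pvLenB d) 0
        (by intro x hx; simp at hx; omega) (PySem.List.index?_cons_self _ _)
      simp only [List.length_cons, List.length_nil] at hloop
      norm_num at hloop
      simp only [get_max_seq_length, get_max_seq_length_alt, List.map_cons,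
        PySem.List.max?_id_cons, Option.getD_some, hloop]
      have hAB : pvLenA = pvLenB := rfl
      simp [hAB]
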